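-- pv_equiv track=rewrite | github.com/every-algorithm/python | search/the_library_of_babel.py | int_to_book
-- ===== SOURCE A (Python) =====
-- ALPHABET = ' ' + 'abcdefghijklmnopqrstuvwxyz'
--
-- BASE = len(ALPHABET)
--
-- def int_to_book(index, length=80):
--     """
--     Convert an integer `index` into a book string of fixed `length`.
--     """
--     # Convert index to digits in the chosen base
--     digits = []
--     while index:
--         index, rem = divmod(index, BASE)
--         digits.append(rem)
--     if not digits:
--         digits.append(0)
--     # Map digits to characters
--     chars = [ALPHABET[d] for d in digits]
--     chars.reverse()
--     # Pad the book to the required length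
--     book = ''.join(chars).ljust(length, ALPHABET[0])
--     return book
-- ===== SOURCE B (Python) =====
-- ALPHABET = ' ' + 'abcdefghijklmnopqrstuvwxyz'
--
-- BASE = len(ALPHABET)
--
-- def int_to_book(index, length=80):
--     """
--     Convert an integer `index` into a book string of fixed `length`.
--     """
--     # Number of base-27 digits needed (1 for index == 0).
--     k = 1
--     while BASE ** k <= index:
--         k += 1
--     # Emit digits most-significant-first; no list, no reverse.
--     book = ''
--     for i in range(k - 1, -1, -1):
--         book += ALPHABET[(index // BASE ** i) % BASE]
--     return book.ljust(length, ALPHABET[0])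
-- ===== Notes on version B (the rewrite author's own statement) =====
-- stated objective: alternative
-- what changed: B replaces A's LSB-first divmod loop + list + reverse + join with a digit-count computation followed by direct MSB-first extraction ((index // BASE**i) % BASE), appending straight to the string with no intermediate list or reversal.
import Mathlib
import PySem

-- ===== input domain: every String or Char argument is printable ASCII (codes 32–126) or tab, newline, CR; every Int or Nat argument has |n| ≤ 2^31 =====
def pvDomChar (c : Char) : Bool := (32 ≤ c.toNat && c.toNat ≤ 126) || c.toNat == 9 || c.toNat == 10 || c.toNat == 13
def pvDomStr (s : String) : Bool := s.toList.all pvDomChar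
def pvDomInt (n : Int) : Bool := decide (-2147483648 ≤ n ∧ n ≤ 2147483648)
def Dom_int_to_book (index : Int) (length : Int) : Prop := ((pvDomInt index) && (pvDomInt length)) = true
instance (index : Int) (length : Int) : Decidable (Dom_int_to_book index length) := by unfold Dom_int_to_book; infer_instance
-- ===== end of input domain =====

-- B builds the book most-significant-digit first from a digit count, instead of A's
-- LSB-first divmod loop with a list reversal; same return value on all index ≥ 0.

-- ===== PORT A =====

-- ALPHABET = ' ' + 'abcdefghijklmnopqrstuvwxyz'  (BASE = 27)
def pvAlphabet : List Char := " abcdefghijklmnopqrstuvwxyz".toList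

-- 'while index: index, rem = divmod(index, BASE); digits.append(rem)'.
-- Python diverges for index < 0 (divmod keeps index negative); such inputs are
-- outside Pre_int_to_book, and the port returns the accumulator there.
def pvDigitsA (index : Int) (digits : List Int) : List Int :=
  if 0 < index then
    pvDigitsA (PySem.Int.floordiv index 27) (digits ++ [PySem.Int.mod index 27])
  else digits
termination_by index.toNat
decreasing_by
  rename_i h
  rw [PySem.Int.floordiv_eq_ediv_of_pos (by omega)]
  omega

def int_to_book (index : Int) (length : Int) : String :=
  let digits := pvDigitsA index []
  let digits := if digits = [] then [0] else digits
  -- chars = [ALPHABET[d] for d in digits]; d is always in range (d = n % 27), so getD is never taken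
  let chars := (digits.map (fun d => (PySem.List.pyGet? pvAlphabet d).getD ' ')).reverse
  -- ''.join(chars).ljust(length, ALPHABET[0]): pad with ' ' up to length (no-op if length ≤ len)
  String.ofList (chars ++ List.replicate (length - (chars.length : Int)).toNat ' ')

-- ===== PORT B =====

-- 'k = 1; while BASE ** k <= index: k += 1'
def pvNumDigits (index : Int) (k : Nat) : Nat :=
  if (27 : Int) ^ k ≤ index then pvNumDigits index (k + 1) else k
termination_by (index + 1 - 27 ^ k).toNat
decreasing_by
  rename_i h
  have hp : (0 : Int) < 27 ^ k := by positivity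
  have hs : (27 : Int) ^ (k + 1) = 27 ^ k * 27 := pow_succ 27 k
  omega


def int_to_book_alt (index : Int) (length : Int) : String :=
  let k := pvNumDigits index 1
  -- for i in range(k-1, -1, -1): book += ALPHABET[(index // BASE ** i) % BASE]
  -- every i in the range is ≥ 0, so 'BASE ** i' is exactly (27 : Int) ^ i.toNat
  let book := (PySem.List.pyRange ((k : Int) - 1) (-1) (-1)).foldl
    (fun s i =>
      s ++ [(PySem.List.pyGet? pvAlphabet
              (PySem.Int.mod (PySem.Int.floordiv index ((27 : Int) ^ i.toNat)) 27)).getD ' '])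
    ([] : List Char)
  String.ofList (book ++ List.replicate (length - (book.length : Int)).toNat ' ')

-- ===== PRECONDITION & SPEC =====
-- A's divmod loop never terminates for negative index (floor division keeps it negative),
-- so Pre_ admits exactly the inputs on which the Python A returns.
def Pre_int_to_book (index : Int) (length : Int) : Prop := 0 ≤ index
instance (index : Int) (length : Int) : Decidable (Pre_int_to_book index length) := by unfold Pre_int_to_book; infer_instance
def pvWitness_int_to_book : Int × Int := (703, 5)

def Spec_int_to_book (index : Int) (length : Int) (out : String) : Prop := out = int_to_book_alt index length
instance (index : Int) (length : Int) (out : String) : Decidable (Spec_int_to_book index length out) := by unfold Spec_int_to_book; infer_instance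

-- ===== CLAIM (what is proved, stated in full; the proofs are below) =====
def Claim_equal_int_to_book : Prop := ∀ (index : Int) (length : Int), Dom_int_to_book index length → Pre_int_to_book index length → Spec_int_to_book index length (int_to_book index length)

-- ===== LEMMAS AND PROOFS =====

-- most-significant-first digits of n, k of them
def pvMsb (n : Int) (k : Nat) : List Int :=
  match k with
  | 0 => []
  | k + 1 => pvMsb (PySem.Int.floordiv n 27) k ++ [PySem.Int.mod n 27]


theorem pvDigitsA_acc (n : Int) (acc : List Int) :
    pvDigitsA n acc = acc ++ pvDigitsA n [] := by
  by_cases h : 0 < n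
  · rw [pvDigitsA, if_pos h, pvDigitsA_acc (PySem.Int.floordiv n 27) (acc ++ [PySem.Int.mod n 27])]
    conv_rhs => rw [pvDigitsA, if_pos h,
      pvDigitsA_acc (PySem.Int.floordiv n 27) ([] ++ [PySem.Int.mod n 27])]
    simp
  · rw [pvDigitsA, if_neg h]
    conv_rhs => rw [pvDigitsA, if_neg h]
    simp
termination_by n.toNat
decreasing_by all_goals (rw [PySem.Int.floordiv_eq_ediv_of_pos (by omega)]; omega)

theorem pvDigitsA_pos (n : Int) (h : 0 < n) :
    pvDigitsA n [] = PySem.Int.mod n 27 :: pvDigitsA (PySem.Int.floordiv n 27) [] := by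
  rw [pvDigitsA, if_pos h, pvDigitsA_acc]
  simp

theorem pvFloordiv_nonneg (n : Int) (h : 0 ≤ n) : 0 ≤ PySem.Int.floordiv n 27 := by
  rw [PySem.Int.floordiv_eq_ediv_of_pos (by omega)]; omega

theorem pvDigitsA_reverse (n : Int) (h : 0 ≤ n) :
    (pvDigitsA n []).reverse = pvMsb n (pvDigitsA n []).length := by
  by_cases hp : 0 < n
  · rw [pvDigitsA_pos n hp]
    simp only [List.reverse_cons, List.length_cons]
    rw [pvDigitsA_reverse (PySem.Int.floordiv n 27) (pvFloordiv_nonneg n h)]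
    rfl
  · have hz : pvDigitsA n [] = [] := by rw [pvDigitsA, if_neg hp]
    rw [hz]; rfl
termination_by n.toNat
decreasing_by rw [PySem.Int.floordiv_eq_ediv_of_pos (by omega)]; omega

theorem pvDigitsA_bounds (n : Int) (h : 0 < n) :
    1 ≤ (pvDigitsA n []).length ∧
      27 ^ ((pvDigitsA n []).length - 1) ≤ n ∧ n < 27 ^ (pvDigitsA n []).length := by
  rw [pvDigitsA_pos n h]
  by_cases h27 : n < 27
  · have hq : PySem.Int.floordiv n 27 = 0 := by
      rw [PySem.Int.floordiv_eq_ediv_of_pos (by omega)]; omega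
    rw [hq]
    have hz : pvDigitsA 0 [] = [] := by rw [pvDigitsA]; simp
    rw [hz]
    simp; omega
  · have hqpos : 0 < PySem.Int.floordiv n 27 := by
      rw [PySem.Int.floordiv_eq_ediv_of_pos (by omega)]; omega
    obtain ⟨h1, h2, h3⟩ := pvDigitsA_bounds (PySem.Int.floordiv n 27) hqpos
    have hfd : PySem.Int.floordiv n 27 = n / 27 := PySem.Int.floordiv_eq_ediv_of_pos (by omega)
    set q := PySem.Int.floordiv n 27 with hqdef
    have hb : q * 27 ≤ n ∧ n < q * 27 + 27 := by rw [hfd]; omega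
    obtain ⟨m, hm⟩ : ∃ m, (pvDigitsA q []).length = m + 1 :=
      ⟨(pvDigitsA q []).length - 1, by omega⟩
    rw [hm] at h2 h3
    simp only [List.length_cons, hm, Nat.add_sub_cancel]
    refine ⟨by omega, ?_, ?_⟩
    · calc (27:Int) ^ (m + 1) = 27 ^ m * 27 := pow_succ 27 m
      _ ≤ q * 27 := by
          have : (27:Int) ^ m ≤ q := by simpa using h2
          nlinarith
      _ ≤ n := hb.1
    · calc n < q * 27 + 27 := hb.2
      _ = (q + 1) * 27 := by ring
      _ ≤ 27 ^ (m + 1) * 27 := by nlinarith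
      _ = 27 ^ (m + 1 + 1) := (pow_succ 27 (m+1)).symm
termination_by n.toNat
decreasing_by rw [PySem.Int.floordiv_eq_ediv_of_pos (by omega)]; omega

theorem pvNumDigits_bounds (n : Int) (k : Nat) :
    k ≤ pvNumDigits n k ∧ n < 27 ^ pvNumDigits n k ∧
      (pvNumDigits n k = k ∨ 27 ^ (pvNumDigits n k - 1) ≤ n) := by
  fun_induction pvNumDigits n k with
  | case1 k h ih =>
    refine ⟨by omega, ih.2.1, Or.inr ?_⟩
    rcases ih.2.2 with h2 | h2
    · rw [h2]; simpa using h
    · exact h2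
  | case2 k h =>
    exact ⟨le_refl _, by omega, Or.inl rfl⟩

theorem pvLen_unique (n : Int) (L M : Nat) (hL1 : 1 ≤ L) (hL2 : (27:Int) ^ (L - 1) ≤ n)
    (hL3 : n < 27 ^ L) (hM1 : 1 ≤ M) (hM2 : (27:Int) ^ (M - 1) ≤ n) (hM3 : n < 27 ^ M) :
    L = M := by
  rcases lt_trichotomy L M with hlt | heq | hgt
  · exfalso
    have : (27:Int) ^ L ≤ 27 ^ (M - 1) := pow_le_pow_right₀ (by norm_num) (by omega)
    omega
  · exact heq
  · exfalso
    have : (27:Int) ^ M ≤ 27 ^ (L - 1) := pow_le_pow_right₀ (by norm_num) (by omega)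
    omega

theorem pvMsb_map (n : Int) (h : 0 ≤ n) (k : Nat) :
    pvMsb n k = (List.range k).map
      (fun j => PySem.Int.mod (PySem.Int.floordiv n ((27 : Int) ^ (k - 1 - j))) 27) := by
  induction k generalizing n with
  | zero => rfl
  | succ k ih =>
    rw [List.range_succ, List.map_append]
    show pvMsb (PySem.Int.floordiv n 27) k ++ [PySem.Int.mod n 27] = _
    rw [ih (PySem.Int.floordiv n 27) (pvFloordiv_nonneg n h)]
    congr 1
    · apply List.map_congr_left
      intro j hj
      have hjk : j < k := List.mem_range.mp hj
      have e1 : k + 1 - 1 - j = (k - 1 - j) + 1 := by omega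
      have h2 : PySem.Int.floordiv (PySem.Int.floordiv n 27) ((27:Int) ^ (k - 1 - j))
          = PySem.Int.floordiv n ((27:Int) ^ (k - 1 - j + 1)) := by
        rw [PySem.Int.floordiv_eq_ediv_of_pos (a := n) (by omega),
          PySem.Int.floordiv_eq_ediv_of_pos (by positivity),
          PySem.Int.floordiv_eq_ediv_of_pos (by positivity),
          Int.ediv_ediv_of_nonneg (by omega), pow_succ, mul_comm]
      rw [h2, e1]
    · have hone : PySem.Int.floordiv n ((27:Int) ^ (k + 1 - 1 - k)) = n := by
        rw [Nat.add_sub_cancel, Nat.sub_self, pow_zero,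
          PySem.Int.floordiv_eq_ediv_of_pos (by omega), Int.ediv_one]
      simp only [List.map_cons, List.map_nil, hone]

theorem pvCharsB (index : Int) (k : Nat) :
    (PySem.List.pyRange ((k : Int) - 1) (-1) (-1)).foldl
      (fun s i =>
        s ++ [(PySem.List.pyGet? pvAlphabet
                (PySem.Int.mod (PySem.Int.floordiv index ((27 : Int) ^ i.toNat)) 27)).getD ' '])
      ([] : List Char)
    = (List.range k).map (fun j =>
        (PySem.List.pyGet? pvAlphabet
          (PySem.Int.mod (PySem.Int.floordiv index ((27 : Int) ^ (k - 1 - j))) 27)).getD ' ') := by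
  rw [PySem.List.foldl_append_singleton_eq_map, PySem.List.pyRange_neg_one, List.map_map]
  have hk : (((k : Int) - 1) - (-1)).toNat = k := by omega
  rw [hk, List.nil_append]
  apply List.map_congr_left
  intro j hj
  have hjk : j < k := List.mem_range.mp hj
  have : (((k : Int) - 1) - (j : Int)).toNat = k - 1 - j := by omega
  simp only [Function.comp_apply, this]

-- ===== VERDICT (by name: the statement is the Claim_ definition above) =====
theorem int_to_book_spec : Claim_equal_int_to_book := by
  intro index length hDom hPre
  have h0 : 0 ≤ index := hPre
  show int_to_book index length = int_to_book_alt index length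
  simp only [int_to_book, int_to_book_alt]
  rw [pvCharsB]
  by_cases hp : 0 < index
  · have hne : pvDigitsA index [] ≠ [] := by rw [pvDigitsA_pos index hp]; simp
    rw [if_neg hne, ← List.map_reverse, pvDigitsA_reverse index h0,
      pvMsb_map index h0, List.map_map]
    obtain ⟨hA1, hA2, hA3⟩ := pvDigitsA_bounds index hp
    obtain ⟨hN1, hN2, hN3⟩ := pvNumDigits_bounds index 1
    have hN2' : (27:Int) ^ (pvNumDigits index 1 - 1) ≤ index := by
      rcases hN3 with h | h
      · rw [h]; simpa using hp
      · exact h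
    have hLk : (pvDigitsA index []).length = pvNumDigits index 1 :=
      pvLen_unique index _ _ hA1 hA2 hA3 hN1 hN2' hN2
    rw [hLk]
    simp [Function.comp_def]
  · have hz : index = 0 := by omega
    subst hz
    have hA : pvDigitsA 0 [] = [] := by rw [pvDigitsA]; simp
    rw [hA, if_pos rfl]
    have hk : pvNumDigits 0 1 = 1 := by rw [pvNumDigits]; simp
    rw [hk]
    norm_num [List.range_succ, PySem.Int.floordiv, PySem.Int.mod]
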